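-- pv_equiv track=rewrite | github.com/GiseleBCSantos/PEC | Sem14At2Q2.py | atributos
-- ===== SOURCE A (Python) =====
-- def atributos(lista):
--     qntdNeg = 0
--     somaPosit = 0
--     for i in lista:
--         if i >= 0:
--             somaPosit += i
--         else:
--             qntdNeg += 1
--     return qntdNeg, somaPosit
-- ===== SOURCE B (Python) =====
-- def atributos(lista):
--     return (sum(1 for x in lista if x < 0),
--             sum(x for x in lista if x >= 0))
-- ===== Notes on version B (the rewrite author's own statement) =====
-- stated objective: idiomatic
-- what changed: Replaced A's single fused accumulator loop with two independent filter-and-sum comprehensions, one per result component.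
import Mathlib
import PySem

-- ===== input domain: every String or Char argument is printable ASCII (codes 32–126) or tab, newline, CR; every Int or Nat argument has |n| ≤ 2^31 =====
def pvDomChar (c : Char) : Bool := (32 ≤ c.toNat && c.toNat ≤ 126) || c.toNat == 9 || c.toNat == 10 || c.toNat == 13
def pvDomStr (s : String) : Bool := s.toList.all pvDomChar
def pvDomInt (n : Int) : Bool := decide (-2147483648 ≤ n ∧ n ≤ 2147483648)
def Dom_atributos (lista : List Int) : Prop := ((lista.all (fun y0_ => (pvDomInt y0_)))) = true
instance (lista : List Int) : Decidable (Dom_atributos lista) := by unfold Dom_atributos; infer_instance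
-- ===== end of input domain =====

-- B replaces A's single fused accumulator loop with two independent filter-and-sum passes (idiomatic decomposition; same cost).

-- ===== PORT A =====
-- single pass, pair accumulator (qntdNeg, somaPosit)
def atributos (lista : List Int) : Int × Int :=
  lista.foldl (fun (st : Int × Int) i =>
    if i ≥ 0 then (st.1, st.2 + i) else (st.1 + 1, st.2)) (0, 0)

-- ===== PORT B =====
-- two separate scans: count of negatives, sum of non-negatives
def atributos_alt (lista : List Int) : Int × Int :=
  (((lista.filter (fun x => x < 0)).map (fun _ => (1 : Int))).sum,
   (lista.filter (fun x => x ≥ 0)).sum)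

-- ===== PRECONDITION & SPEC =====
def Spec_atributos (lista : List Int) (out : Int × Int) : Prop := out = atributos_alt lista
instance (lista : List Int) (out : Int × Int) : Decidable (Spec_atributos lista out) := by unfold Spec_atributos; infer_instance

-- ===== CLAIM (what is proved, stated in full; the proofs are below) =====
def Claim_equal_atributos : Prop := ∀ (lista : List Int), Dom_atributos lista → Spec_atributos lista (atributos lista)

-- ===== LEMMAS AND PROOFS =====
theorem atributos_fold_shift (lista : List Int) (q s : Int) :
    lista.foldl (fun (st : Int × Int) i =>
      if i ≥ 0 then (st.1, st.2 + i) else (st.1 + 1, st.2)) (q, s)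
    = (q + (((lista.filter (fun x => x < 0)).map (fun _ => (1 : Int))).sum),
       s + (lista.filter (fun x => x ≥ 0)).sum) := by
  induction lista generalizing q s with
  | nil => simp
  | cons h t ih =>
    by_cases hh : h ≥ 0
    · have hn : ¬ h < 0 := by omega
      simp [List.foldl, hh, hn, List.filter, ih]
      ring
    · have hn : h < 0 := by omega
      simp [List.foldl, hh, hn, List.filter, ih]
      ring

-- ===== VERDICT (by name: the statement is the Claim_ definition above) =====
theorem atributos_spec : Claim_equal_atributos := by
  intro lista _
  unfold Spec_atributos atributos atributos_alt
  rw [atributos_fold_shift]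
  simp
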